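-- pv_equiv track=rewrite | github.com/Falsa89/Divine | scripts/normalize_berserker_sheets_v2.py | merge_smallest_into_neighbor
-- ===== SOURCE A (Python) =====
-- def blob_area(prof, blob):
--     return sum(prof[blob[0]:blob[1]])
--
-- def merge_smallest_into_neighbor(blobs, prof):
--     """
--     Euristica migliore: trova il blob di area minima e lo mergia col vicino
--     di gap minore. Questo assorbe residui/scintille nel frame che li contiene
--     davvero, invece di fondere due frame grandi tra loro.
--     """
--     if len(blobs) < 2:
--         return blobs, {"merged_area": -1, "gap": -1}
--     areas = [blob_area(prof, b) for b in blobs]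
--     min_i = min(range(len(areas)), key=lambda k: areas[k])
--     if min_i == 0:
--         target = 1
--         gap = blobs[1][0] - blobs[0][1]
--     elif min_i == len(blobs) - 1:
--         target = len(blobs) - 2
--         gap = blobs[min_i][0] - blobs[target][1]
--     else:
--         gap_left = blobs[min_i][0] - blobs[min_i - 1][1]
--         gap_right = blobs[min_i + 1][0] - blobs[min_i][1]
--         if gap_left <= gap_right:
--             target = min_i - 1
--             gap = gap_left
--         else:
--             target = min_i + 1
--             gap = gap_right
--     a, b = sorted((min_i, target))
--     merged = blobs[:a] + [[blobs[a][0], blobs[b][1]]] + blobs[b + 1:]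
--     return merged, {"absorbed_area": areas[min_i], "gap": gap, "abs_idx": min_i}
-- ===== SOURCE B (Python) =====
-- from itertools import accumulate
--
-- def merge_smallest_into_neighbor(blobs, prof):
--     if len(blobs) < 2:
--         return blobs, {"merged_area": -1, "gap": -1}
--     pref = [0] + list(accumulate(prof))
--     n = len(prof)
--
--     def clip(i):
--         if i < 0:
--             i += n
--         return min(max(i, 0), n)
--
--     def area(b):
--         lo, hi = clip(b[0]), clip(b[1])
--         return pref[hi] - pref[lo] if lo < hi else 0
--
--     min_area, min_i = min((area(b), k) for k, b in enumerate(blobs))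
--     cand = []
--     if min_i > 0:
--         cand.append((blobs[min_i][0] - blobs[min_i - 1][1], min_i - 1))
--     if min_i < len(blobs) - 1:
--         cand.append((blobs[min_i + 1][0] - blobs[min_i][1], min_i + 1))
--     gap, target = min(cand)
--     a = min(min_i, target)
--     merged = blobs[:a] + [[blobs[a][0], blobs[a + 1][1]]] + blobs[a + 2:]
--     return merged, {"absorbed_area": min_area, "gap": gap, "abs_idx": min_i}
-- ===== Notes on version B (the rewrite author's own statement) =====
-- stated objective: alternative
-- what changed: Areas are computed from a single prefix-sum table (itertools.accumulate) instead of summing a slice per blob, the argmin becomes a lexicographic min over (area, index) pairs instead of min(range(...), key=...), and the three-way neighbor branch becomes a min over a candidate list; the splice uses the adjacency of the merged pair instead of sorted().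
import Mathlib
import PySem

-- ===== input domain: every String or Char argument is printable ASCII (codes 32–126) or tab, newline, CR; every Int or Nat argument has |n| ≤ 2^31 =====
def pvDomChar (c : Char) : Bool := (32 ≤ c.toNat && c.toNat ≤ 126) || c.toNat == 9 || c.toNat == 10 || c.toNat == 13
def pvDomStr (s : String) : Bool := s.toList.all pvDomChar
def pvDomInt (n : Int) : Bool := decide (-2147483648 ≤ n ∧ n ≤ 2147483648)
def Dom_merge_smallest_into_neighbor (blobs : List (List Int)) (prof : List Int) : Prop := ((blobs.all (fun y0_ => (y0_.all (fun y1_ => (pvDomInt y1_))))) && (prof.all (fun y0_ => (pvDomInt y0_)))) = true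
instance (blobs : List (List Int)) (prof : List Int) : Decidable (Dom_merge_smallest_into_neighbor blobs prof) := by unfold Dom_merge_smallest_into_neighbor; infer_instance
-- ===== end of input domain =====

-- B replaces A's per-blob slice summing by one prefix-sum table, the keyed argmin by a
-- lexicographic min over (area, index) pairs, and the three-way neighbor branch by a min
-- over a candidate list; same return value (alternative decomposition, no speed claim).

-- ===== PORT A =====
-- blobs[i][j]; all such indices are in range under Pre_, so pyGetD's default is never reached
def pvGetA (blobs : List (List Int)) (i j : Int) : Int :=
  PySem.List.pyGetD (PySem.List.pyGetD blobs i []) j 0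

-- sum(prof[blob[0]:blob[1]]); blob[0]/blob[1] in range under Pre_
def blob_area (prof : List Int) (blob : List Int) : Int :=
  (PySem.List.slice prof (some (PySem.List.pyGetD blob 0 0)) (some (PySem.List.pyGetD blob 1 0))).sum

def merge_smallest_into_neighbor (blobs : List (List Int)) (prof : List Int) :
    List (List Int) × (List (String × Int)) :=
  if blobs.length < 2 then (blobs, [("merged_area", -1), ("gap", -1)])
  else
    let areas : List Int := blobs.map (fun b => blob_area prof b)
    let min_i : Int :=
      (PySem.List.min? (PySem.List.pyRange 0 (areas.length : Int))
        (fun k => PySem.List.pyGetD areas k 0)).getD 0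
    -- tg = (target, gap)
    let tg : Int × Int :=
      if min_i = 0 then
        (1, pvGetA blobs 1 0 - pvGetA blobs 0 1)
      else if min_i = (blobs.length : Int) - 1 then
        ((blobs.length : Int) - 2, pvGetA blobs min_i 0 - pvGetA blobs ((blobs.length : Int) - 2) 1)
      else
        let gap_left := pvGetA blobs min_i 0 - pvGetA blobs (min_i - 1) 1
        let gap_right := pvGetA blobs (min_i + 1) 0 - pvGetA blobs min_i 1
        if gap_left ≤ gap_right then (min_i - 1, gap_left) else (min_i + 1, gap_right)
    -- a, b = sorted((min_i, target))
    let a := min min_i tg.1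
    let b := max min_i tg.1
    let merged := PySem.List.slice blobs none (some a) ++
      [[pvGetA blobs a 0, pvGetA blobs b 1]] ++ PySem.List.slice blobs (some (b + 1)) none
    (merged, [("absorbed_area", PySem.List.pyGetD areas min_i 0), ("gap", tg.2), ("abs_idx", min_i)])

-- ===== PORT B =====
-- list(accumulate(prof)) starting from s
def pvAccum (xs : List Int) (s : Int) : List Int :=
  match xs with
  | [] => []
  | x :: t => (s + x) :: pvAccum t (s + x)

-- clip(i): Python slice-bound normalization
def pvClip (n i : Int) : Int :=
  min (max (if i < 0 then i + n else i) 0) n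

-- area(b) via the prefix table; b[0]/b[1] in range under Pre_
def pvAreaB (pref : List Int) (n : Int) (b : List Int) : Int :=
  let lo := pvClip n (PySem.List.pyGetD b 0 0)
  let hi := pvClip n (PySem.List.pyGetD b 1 0)
  if lo < hi then PySem.List.pyGetD pref hi 0 - PySem.List.pyGetD pref lo 0 else 0

-- blobs[i][j]; in range under Pre_
def pvGetB (blobs : List (List Int)) (i j : Int) : Int :=
  PySem.List.pyGetD (PySem.List.pyGetD blobs i []) j 0

def merge_smallest_into_neighbor_alt (blobs : List (List Int)) (prof : List Int) :
    List (List Int) × (List (String × Int)) :=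
  if blobs.length < 2 then (blobs, [("merged_area", -1), ("gap", -1)])
  else
    let pref : List Int := 0 :: pvAccum prof 0
    let n : Int := (prof.length : Int)
    let pairs : List (Int × Int) :=
      (PySem.List.enumerate blobs).map (fun p => (pvAreaB pref n p.2, p.1))
    let am : Int × Int := (PySem.List.min2? pairs Prod.fst Prod.snd).getD (0, 0)
    let cand : List (Int × Int) :=
      (if 0 < am.2 then [(pvGetB blobs am.2 0 - pvGetB blobs (am.2 - 1) 1, am.2 - 1)] else []) ++
      (if am.2 < (blobs.length : Int) - 1 then
        [(pvGetB blobs (am.2 + 1) 0 - pvGetB blobs am.2 1, am.2 + 1)] else [])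
    -- gt = (gap, target)
    let gt : Int × Int := (PySem.List.min2? cand Prod.fst Prod.snd).getD (0, 0)
    let a := min am.2 gt.2
    let merged := PySem.List.slice blobs none (some a) ++
      [[pvGetB blobs a 0, pvGetB blobs (a + 1) 1]] ++ PySem.List.slice blobs (some (a + 2)) none
    (merged, [("absorbed_area", am.1), ("gap", gt.1), ("abs_idx", am.2)])

-- ===== PRECONDITION & SPEC =====
-- Pre_ excludes exactly the inputs where Python A raises: with ≥ 2 blobs, blob_area reads
-- blob[0] and blob[1] of every blob, an IndexError whenever some blob has fewer than 2 entries.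
def Pre_merge_smallest_into_neighbor (blobs : List (List Int)) (prof : List Int) : Prop :=
  blobs.length < 2 ∨ ∀ b ∈ blobs, 2 ≤ b.length
instance (blobs : List (List Int)) (prof : List Int) : Decidable (Pre_merge_smallest_into_neighbor blobs prof) := by unfold Pre_merge_smallest_into_neighbor; infer_instance

def pvWitness_merge_smallest_into_neighbor : List (List Int) × List Int :=
  ([[0, 2], [3, 5]], [1, 2, 3, 4, 5])

def Spec_merge_smallest_into_neighbor (blobs : List (List Int)) (prof : List Int) (out : List (List Int) × (List (String × Int))) : Prop := out = merge_smallest_into_neighbor_alt blobs prof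
instance (blobs : List (List Int)) (prof : List Int) (out : List (List Int) × (List (String × Int))) : Decidable (Spec_merge_smallest_into_neighbor blobs prof out) := by unfold Spec_merge_smallest_into_neighbor; infer_instance

-- ===== CLAIM (what is proved, stated in full; the proofs are below) =====
def Claim_equal_merge_smallest_into_neighbor : Prop := ∀ (blobs : List (List Int)) (prof : List Int), Dom_merge_smallest_into_neighbor blobs prof → Pre_merge_smallest_into_neighbor blobs prof → Spec_merge_smallest_into_neighbor blobs prof (merge_smallest_into_neighbor blobs prof)

-- ===== LEMMAS AND PROOFS =====

-- the fold step of PySem.List.min? with key f (Python min(..., key=f): keep the FIRST minimum)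
def pvStep1 (f : Int → Int) (acc : Option Int) (x : Int) : Option Int :=
  match acc with
  | none => some x
  | some m => if f x < f m then some x else some m

-- the fold step of PySem.List.min2? with keys fst, snd (lexicographic min over pairs)
def pvStep2 (acc : Option (Int × Int)) (x : Int × Int) : Option (Int × Int) :=
  match acc with
  | none => some x
  | some m => if (decide (x.1 < m.1) || !decide (m.1 < x.1) && decide (x.2 < m.2)) = true then some x else some m

lemma pvMin1_eq (xs : List Int) (f : Int → Int) :
    PySem.List.min? xs f = List.foldl (pvStep1 f) none xs := by
  unfold PySem.List.min?
  exact PySem.List.foldl_congr_mem xs _ _ none (fun acc x _ => by cases acc <;> rfl)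

lemma pvMin2_eq (xs : List (Int × Int)) :
    PySem.List.min2? xs Prod.fst Prod.snd = List.foldl pvStep2 none xs := by
  unfold PySem.List.min2?
  exact PySem.List.foldl_congr_mem xs _ _ none (fun acc x _ => by cases acc <;> rfl)

lemma pvStep1_none (f : Int → Int) (x : Int) : pvStep1 f none x = some x := rfl
lemma pvStep2_none (x : Int × Int) : pvStep2 none x = some x := rfl

lemma pvGet_eq : pvGetB = pvGetA := rfl

lemma pvMin2_single (x : Int × Int) : PySem.List.min2? [x] Prod.fst Prod.snd = some x := by
  rw [pvMin2_eq]; rfl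

lemma pvMin2_two (x y : Int × Int) :
    List.foldl pvStep2 none [x, y]
      = if (decide (y.1 < x.1) || !decide (x.1 < y.1) && decide (y.2 < x.2)) = true
        then some y else some x := rfl

-- a started fold of pvStep1 returns some element of m :: l
lemma pvFold1_some (f : Int → Int) :
    ∀ (l : List Int) (m : Int), ∃ r, List.foldl (pvStep1 f) (some m) l = some r ∧ r ∈ m :: l := by
  intro l
  induction l with
  | nil => intro m; exact ⟨m, rfl, by simp⟩
  | cons x t ih =>
    intro m
    by_cases h : f x < f m
    · obtain ⟨r, hr, hm⟩ := ih x
      refine ⟨r, ?_, ?_⟩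
      · simpa [pvStep1, h] using hr
      · rcases List.mem_cons.mp hm with h' | h' <;> simp [h']
    · obtain ⟨r, hr, hm⟩ := ih m
      refine ⟨r, ?_, ?_⟩
      · simpa [pvStep1, h] using hr
      · rcases List.mem_cons.mp hm with h' | h' <;> simp [h']

-- pairing invariant: over a strictly increasing tail the lexicographic pair-min tracks the keyed min
lemma pvFoldPair (f : Int → Int) :
    ∀ (l : List Int) (m : Int), (∀ k ∈ l, m < k) → l.Pairwise (· < ·) →
      List.foldl pvStep2 (some (f m, m)) (l.map (fun k => (f k, k)))
        = Option.map (fun r => (f r, r)) (List.foldl (pvStep1 f) (some m) l) := by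
  intro l
  induction l with
  | nil => intro m _ _; rfl
  | cons x t ih =>
    intro m hgt hpw
    have hmx : m < x := hgt x (by simp)
    have h2 : pvStep2 (some (f m, m)) (f x, x)
        = if f x < f m then some (f x, x) else some (f m, m) := by
      have hxm : ¬ (x < m) := by omega
      simp [pvStep2, hxm]
    have h1 : pvStep1 f (some m) x = if f x < f m then some x else some m := rfl
    simp only [List.map_cons, List.foldl_cons, h1, h2]
    by_cases h : f x < f m
    · simp only [if_pos h]
      exact ih x (fun k hk => (List.pairwise_cons.mp hpw).1 k hk) (List.pairwise_cons.mp hpw).2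
    · simp only [if_neg h]
      exact ih m (fun k hk => hgt k (List.mem_cons_of_mem _ hk)) (List.pairwise_cons.mp hpw).2

lemma pvRange_pairwise (a b : Int) : (PySem.List.pyRange a b).Pairwise (· < ·) := by
  simp only [PySem.List.pyRange]
  norm_num
  exact List.Pairwise.map _ (fun i j hij => by omega) List.pairwise_lt_range

-- sum of a clamped drop/take window is a difference of prefix sums
lemma pvSumWindow (xs : List Int) (a b : Nat) :
    ((xs.drop a).take (b - a)).sum = if a < b then (xs.take b).sum - (xs.take a).sum else 0 := by
  by_cases h : a < b
  · have h2 : xs.take b = xs.take a ++ (xs.drop a).take (b - a) := by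
      rw [← List.take_add]; congr 1; omega
    rw [if_pos h, h2, List.sum_append]; ring
  · have hb : b - a = 0 := by omega
    rw [if_neg h, hb]; simp

lemma pvClip_eq (n : Nat) (i : Int) : pvClip (n : Int) i = ((PySem.List.clampIdx n i : Nat) : Int) := by
  unfold pvClip PySem.List.clampIdx
  split_ifs <;> omega

lemma pvAccum_getD : ∀ (xs : List Int) (s : Int) (j : Nat), j < xs.length →
    (pvAccum xs s).getD j 0 = s + (xs.take (j + 1)).sum := by
  intro xs
  induction xs with
  | nil => intro s j h; simp at h
  | cons x t ih =>
    intro s j h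
    cases j with
    | zero => simp [pvAccum]
    | succ j =>
      have hj := ih (s + x) j (by simpa using h)
      simp only [pvAccum, List.getD_cons_succ, hj, List.take_succ_cons, List.sum_cons]
      ring

lemma pvPref_getD (prof : List Int) (k : Nat) (hk : k ≤ prof.length) :
    (0 :: pvAccum prof 0).getD k 0 = (prof.take k).sum := by
  cases k with
  | zero => simp
  | succ k =>
    have hlt : k < prof.length := by omega
    simp only [List.getD_cons_succ, pvAccum_getD prof 0 k hlt]
    simp

-- the two area computations agree on every blob
lemma pvArea_eq (prof : List Int) (blob : List Int) :
    blob_area prof blob = pvAreaB (0 :: pvAccum prof 0) (prof.length : Int) blob := by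
  simp only [blob_area, pvAreaB]
  rw [pvClip_eq, pvClip_eq]
  set la := PySem.List.clampIdx prof.length (PySem.List.pyGetD blob 0 0) with hla
  set lb := PySem.List.clampIdx prof.length (PySem.List.pyGetD blob 1 0) with hlb
  have hsl : PySem.List.slice prof (some (PySem.List.pyGetD blob 0 0))
      (some (PySem.List.pyGetD blob 1 0)) = (prof.drop la).take (lb - la) := by
    simp [PySem.List.slice, hla, hlb]
  rw [hsl, pvSumWindow]
  rw [PySem.List.pyGetD_natCast, PySem.List.pyGetD_natCast,
    pvPref_getD prof la (PySem.List.clampIdx_le _ _), pvPref_getD prof lb (PySem.List.clampIdx_le _ _)]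
  by_cases h : la < lb
  · rw [if_pos h, if_pos (by exact_mod_cast h)]
  · rw [if_neg h, if_neg (by exact_mod_cast h)]

-- the ports are total and agree on every input (outside Pre_ both use the same defaults)
theorem pv_main (blobs : List (List Int)) (prof : List Int) :
    merge_smallest_into_neighbor blobs prof = merge_smallest_into_neighbor_alt blobs prof := by
  by_cases hlen : blobs.length < 2
  · simp [merge_smallest_into_neighbor, merge_smallest_into_neighbor_alt, hlen]
  · have hnb : 2 ≤ blobs.length := by omega
    have hnb2 : (2 : Int) ≤ (blobs.length : Int) := by exact_mod_cast hnb
    set pref : List Int := 0 :: pvAccum prof 0 with hpref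
    set f : Int → Int :=
      fun k => pvAreaB pref (prof.length : Int) (PySem.List.pyGetD blobs k []) with hf
    have hmap : List.map (fun b => blob_area prof b) blobs
        = List.map (fun b => pvAreaB pref (prof.length : Int) b) blobs :=
      List.map_congr_left (fun b _ => pvArea_eq prof b)
    have hzero : pvAreaB pref (prof.length : Int) ([] : List Int) = 0 := by
      simp [pvAreaB, pvClip, PySem.List.pyGetD, PySem.List.pyGet?, PySem.List.pyIdx?]
    have hkey' : ∀ k : Int,
        PySem.List.pyGetD (List.map (fun b => blob_area prof b) blobs) k 0 = f k := by
      intro k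
      rw [hmap, ← hzero, PySem.List.pyGetD_map (pvAreaB pref (prof.length : Int)) blobs k []]
    have hkey : (fun k => PySem.List.pyGetD (List.map (fun b => blob_area prof b) blobs) k 0) = f :=
      funext hkey'
    have hrange : PySem.List.pyRange 0 (blobs.length : Int)
        = 0 :: PySem.List.pyRange 1 (blobs.length : Int) := by
      rw [PySem.List.pyRange_one_cons (by omega)]
      norm_num
    obtain ⟨r, hfold, hmem⟩ := pvFold1_some f (PySem.List.pyRange 1 (blobs.length : Int)) 0
    have hbounds : 0 ≤ r ∧ r < (blobs.length : Int) := by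
      rcases List.mem_cons.mp hmem with h | h
      · constructor <;> omega
      · have := PySem.List.mem_pyRange_one.mp h
        constructor <;> omega
    have hminA : PySem.List.min? (PySem.List.pyRange 0 (blobs.length : Int)) f = some r := by
      rw [pvMin1_eq, hrange, List.foldl_cons, pvStep1_none]
      exact hfold
    have hlenb : PySem.List.len blobs = (blobs.length : Int) := by
      simp [PySem.List.len]
    have hpairs : List.map (fun p => (pvAreaB pref (prof.length : Int) p.2, p.1))
          (PySem.List.enumerate blobs)
        = List.map (fun k => (f k, k)) (PySem.List.pyRange 0 (blobs.length : Int)) := by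
      rw [PySem.List.enumerate_eq_map_pyRange blobs ([] : List Int), List.map_map, hlenb]
      rfl
    have hminB : PySem.List.min2?
          (List.map (fun p => (pvAreaB pref (prof.length : Int) p.2, p.1))
            (PySem.List.enumerate blobs)) Prod.fst Prod.snd = some (f r, r) := by
      rw [hpairs, pvMin2_eq, hrange, List.map_cons, List.foldl_cons, pvStep2_none]
      rw [pvFoldPair f (PySem.List.pyRange 1 (blobs.length : Int)) 0
        (fun k hk => by have := PySem.List.mem_pyRange_one.mp hk; omega)
        (pvRange_pairwise 1 (blobs.length : Int)), hfold]
      rfl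
    simp only [merge_smallest_into_neighbor, merge_smallest_into_neighbor_alt, if_neg hlen,
      List.length_map, ← hpref, hkey, hkey' r, hminA, hminB, Option.getD_some, pvGet_eq]
    rcases lt_trichotomy r ((blobs.length : Int) - 1) with hcase | hcase | hcase
    · by_cases hr0 : r = 0
      · -- leftmost blob: only a right neighbour
        subst hr0
        rw [if_pos rfl, if_neg (by omega : ¬ (0:Int) < 0),
          if_pos (by omega : (0:Int) < (blobs.length : Int) - 1)]
        rw [List.nil_append, pvMin2_single]
        simp only [Option.getD_some]
        norm_num
      · -- middle blob: two candidates, ties go to the left neighbour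
        rw [if_neg hr0, if_neg (by omega : ¬ r = (blobs.length : Int) - 1),
          if_pos (by omega : 0 < r), if_pos hcase]
        rw [List.cons_append, List.nil_append, pvMin2_eq, pvMin2_two]
        by_cases hg : pvGetA blobs r 0 - pvGetA blobs (r - 1) 1
            ≤ pvGetA blobs (r + 1) 0 - pvGetA blobs r 1
        · rw [if_pos hg, if_neg (by simp; omega)]
          simp only [Option.getD_some]
          rw [min_eq_right (by omega : r - 1 ≤ r), max_eq_left (by omega : r - 1 ≤ r)]
          have e1 : r + 1 = r - 1 + 2 := by omega
          rw [e1]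
          have e3 : r - 1 + 1 = r := by omega
          rw [e3]
        · rw [if_neg hg, if_pos (by simp; omega)]
          simp only [Option.getD_some]
          rw [min_eq_left (by omega : r ≤ r + 1), max_eq_right (by omega : r ≤ r + 1)]
          have e1 : r + 1 + 1 = r + 2 := by omega
          rw [e1]
    · -- rightmost blob: only a left neighbour
      have hr0 : ¬ r = 0 := by omega
      rw [if_neg hr0, if_pos hcase, if_pos (by omega : 0 < r),
        if_neg (by omega : ¬ r < (blobs.length : Int) - 1)]
      rw [List.append_nil, pvMin2_single]
      simp only [Option.getD_some]
      have e2 : (blobs.length : Int) - 2 = r - 1 := by omega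
      rw [e2]
      rw [min_eq_right (by omega : r - 1 ≤ r), max_eq_left (by omega : r - 1 ≤ r)]
      have e1 : r + 1 = r - 1 + 2 := by omega
      rw [e1]
      have e3 : r - 1 + 1 = r := by omega
      rw [e3]
    · exact absurd hcase (by omega)

-- ===== VERDICT (by name: the statement is the Claim_ definition above) =====
theorem merge_smallest_into_neighbor_spec : Claim_equal_merge_smallest_into_neighbor := by
  intro blobs prof _ _
  show merge_smallest_into_neighbor blobs prof = merge_smallest_into_neighbor_alt blobs prof
  exact pv_main blobs prof
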